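-- pv_equiv track=rewrite | github.com/choi2021/thisiscodingtest | 이진탐색 문제/프로그래머스 입국심사.py | solution
-- ===== SOURCE A (Python) =====
-- def solution(n, times):
--   times.sort()
--   start=0
--   end=times[-1]*n
--   result=end
--
--   while start<=end:
--     mid=(start+end)//2
--     num=0
--     for i in times:
--       num+=mid//i
--     if num>=n:
--       result=mid
--       end=mid-1
--     else:
--       start=mid+1
--   return result
-- ===== SOURCE B (Python) =====
-- def solution(n, times):
--     times.sort()
--     freq = {}
--     for t in times:
--         freq[t] = freq.get(t, 0) + 1
--     pairs = list(freq.items())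
--
--     def search(lo, hi, best):
--         if lo > hi:
--             return best
--         mid = (lo + hi) // 2
--         cnt = 0
--         for t, c in pairs:
--             cnt += (mid // t) * c
--         if cnt >= n:
--             return search(lo, mid - 1, mid)
--         return search(mid + 1, hi, best)
--
--     hi = times[-1] * n
--     return search(0, hi, hi)
-- ===== Notes on version B (the rewrite author's own statement) =====
-- stated objective: alternative
-- what changed: B builds a frequency dictionary of times once so each binary-search probe does one division per DISTINCT time (cnt += (mid//t)*c over freq.items()) instead of A's scan of the full list, and reshapes the while-loop into an explicit recursion search(lo, hi, best); B performs the same times.sort() mutation as A.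
-- outside the precondition, e.g. on solution(3, []): A raises IndexError, B raises IndexError; on solution(2, [0, 3]): A raises ZeroDivisionError, B raises ZeroDivisionError
import Mathlib
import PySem

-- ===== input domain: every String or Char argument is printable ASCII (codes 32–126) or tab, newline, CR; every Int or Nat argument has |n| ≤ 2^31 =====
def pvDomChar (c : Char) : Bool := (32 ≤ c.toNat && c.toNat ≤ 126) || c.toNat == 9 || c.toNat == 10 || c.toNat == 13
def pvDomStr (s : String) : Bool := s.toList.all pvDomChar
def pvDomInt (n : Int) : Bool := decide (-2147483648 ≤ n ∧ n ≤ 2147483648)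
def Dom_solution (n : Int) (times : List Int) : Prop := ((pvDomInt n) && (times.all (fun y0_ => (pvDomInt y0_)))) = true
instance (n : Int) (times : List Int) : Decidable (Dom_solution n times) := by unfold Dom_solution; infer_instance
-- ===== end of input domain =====

-- B replaces A's imperative while-loop binary search by an explicit recursion search(lo,hi,best)
-- and replaces A's per-probe scan of the whole list by a frequency dictionary built once, so each
-- probe does one division per DISTINCT time (alternative decomposition; same asymptotic cost);
-- like A, B sorts `times` in place (side effect preserved).


-- ===== PORT A =====
-- the while loop of A, state = (start, end, result)
def pvLoopA (n : Int) (times : List Int) (start e result : Int) : Int :=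
  if h : start ≤ e then
    let mid := PySem.Int.floordiv (start + e) 2
    let num := times.foldl (fun acc i => acc + PySem.Int.floordiv mid i) 0
    if num ≥ n then pvLoopA n times start (mid - 1) mid
    else pvLoopA n times (mid + 1) e result
  else result
termination_by (e - start + 1).toNat
decreasing_by
  · have hm := PySem.Int.floordiv_two_mid_bounds h; omega
  · have hm := PySem.Int.floordiv_two_mid_bounds h; omega

def solution (n : Int) (times : List Int) : Int :=
  let ts := PySem.List.sorted times (fun x => x) false
  let start : Int := 0
  let e := PySem.List.pyGetD ts (-1) 0 * n   -- times[-1]; Pre_ guarantees times ≠ []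
  let result := e
  pvLoopA n ts start e result

-- ===== PORT B =====
-- the inner loop of Source B: cnt accumulated over the (time, multiplicity) pairs of the freq dict
def pvCountB (mid : Int) (pairs : List (Int × Int)) : Int :=
  pairs.foldl (fun cnt p => cnt + PySem.Int.floordiv mid p.1 * p.2) 0

-- search(lo, hi, best) from Source B, closed over n and the pairs list
def pvSearchB (n : Int) (pairs : List (Int × Int)) (lo hi best : Int) : Int :=
  if h : lo > hi then best
  else
    let mid := PySem.Int.floordiv (lo + hi) 2
    if pvCountB mid pairs ≥ n then pvSearchB n pairs lo (mid - 1) mid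
    else pvSearchB n pairs (mid + 1) hi best
termination_by (hi - lo + 1).toNat
decreasing_by
  · have hm := PySem.Int.floordiv_two_mid_bounds (by omega : lo ≤ hi); omega
  · have hm := PySem.Int.floordiv_two_mid_bounds (by omega : lo ≤ hi); omega

def solution_alt (n : Int) (times : List Int) : Int :=
  let ts := PySem.List.sorted times (fun x => x) false
  -- freq = {}; for t in times: freq[t] = freq.get(t, 0) + 1
  let freq := ts.foldl (fun d t => d.insert t (d.getD t 0 + 1)) PySem.Dict.empty
  let pairs := freq.items
  let hi := PySem.List.pyGetD ts (-1) 0 * n  -- times[-1]; Pre_ guarantees times ≠ []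
  pvSearchB n pairs 0 hi hi

-- ===== PRECONDITION & SPEC =====
-- Pre_ excludes exactly the inputs where A raises: empty `times` (IndexError on times[-1]) and
-- lists containing 0 whose search interval is nonempty (0 ≤ max(times)*n, and since 0 ∈ times the
-- max equals foldl max 0), on which the first count loop computes mid//0 (ZeroDivisionError).
def Pre_solution (n : Int) (times : List Int) : Prop :=
  times ≠ [] ∧ ¬((0 : Int) ∈ times ∧ 0 ≤ times.foldl max 0 * n)
instance (n : Int) (times : List Int) : Decidable (Pre_solution n times) := by
  unfold Pre_solution; infer_instance
def pvWitness_solution : Int × List Int := (6, [7, 10])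
def Spec_solution (n : Int) (times : List Int) (out : Int) : Prop := out = solution_alt n times
instance (n : Int) (times : List Int) (out : Int) : Decidable (Spec_solution n times out) := by unfold Spec_solution; infer_instance

-- ===== CLAIM (what is proved, stated in full; the proofs are below) =====
def Claim_equal_solution : Prop := ∀ (n : Int) (times : List Int), Dom_solution n times → Pre_solution n times → Spec_solution n times (solution n times)

-- ===== LEMMAS AND PROOFS =====

-- a foldl accumulating f over a list from acc is acc + the sum of the mapped list
theorem pv_foldl_eq_sum {α : Type} (f : α → Int) (l : List α) : ∀ acc : Int,
    l.foldl (fun acc i => acc + f i) acc = acc + (l.map f).sum := by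
  induction l with
  | nil => intro acc; simp
  | cons x xs ih => intro acc; simp [List.foldl, ih (acc + f x)]; ring

-- summing f t * multiplicity over the distinct elements equals summing f over the list
theorem pv_weighted_sum (f : Int → Int) (l : List Int) :
    ((PySem.Set.ofList l).map (fun k => f k * (l.count k : Int))).sum = (l.map f).sum := by
  rw [← List.sum_toFinset _ (PySem.Set.nodup_ofList l)]
  rw [Finset.sum_list_map_count]
  have hfs : (PySem.Set.ofList l).toFinset = l.toFinset := by
    apply Finset.ext; intro a
    simp [List.mem_toFinset, PySem.Set.mem_ofList]
  rw [hfs]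
  apply Finset.sum_congr rfl
  intro m _
  simp [mul_comm]

-- B's counter-based count equals A's per-element count loop
theorem pv_count_eq (mid : Int) (l : List Int) :
    pvCountB mid ((l.foldl (fun d t => d.insert t (d.getD t 0 + 1)) PySem.Dict.empty).items)
      = l.foldl (fun acc i => acc + PySem.Int.floordiv mid i) 0 := by
  rw [PySem.Dict.foldl_insert_getD_add_one_eq_counter, PySem.Dict.items_counter]
  unfold pvCountB
  rw [pv_foldl_eq_sum (fun p : Int × Int => PySem.Int.floordiv mid p.1 * p.2),
      pv_foldl_eq_sum (fun i => PySem.Int.floordiv mid i), List.map_map]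
  have := pv_weighted_sum (fun k => PySem.Int.floordiv mid k) l
  simpa [Function.comp] using this

-- A's loop and B's recursion over the counter pairs compute the same value from the same state
theorem pv_loop_eq_search (n : Int) (l : List Int) : ∀ (m : Nat) (s e r : Int),
    (e - s + 1).toNat = m →
    pvLoopA n l s e r
      = pvSearchB n ((l.foldl (fun d t => d.insert t (d.getD t 0 + 1)) PySem.Dict.empty).items) s e r := by
  intro m
  induction m using Nat.strong_induction_on with
  | _ m ih =>
    intro s e r hm
    rw [pvLoopA, pvSearchB]
    by_cases h : s ≤ e
    · have hgt : ¬ s > e := by omega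
      simp only [h, hgt, dif_pos, dif_neg, not_false_iff]
      have hb := PySem.Int.floordiv_two_mid_bounds h
      rw [pv_count_eq]
      split_ifs with hc
      · exact ih _ (by omega) s (PySem.Int.floordiv (s + e) 2 - 1) _ rfl
      · exact ih _ (by omega) (PySem.Int.floordiv (s + e) 2 + 1) e r rfl
    · have hgt : s > e := by omega
      simp [h, hgt]

-- ===== VERDICT (by name: the statement is the Claim_ definition above) =====
theorem solution_spec : Claim_equal_solution := by
  intro n times _ _
  unfold Spec_solution solution solution_alt
  exact pv_loop_eq_search n _ _ _ _ _ rfl
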